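-- pv_equiv track=rewrite | github.com/noant/spawn-cli | src/spawn_cli/ide/_helpers.py | _parse_split_agent_ignore_lines
-- ===== SOURCE A (Python) =====
-- IGNORE_BLOCK_START = "# spawn:start"
--
-- IGNORE_BLOCK_END = "# spawn:end"
--
-- CORE_IGNORE_BLOCK_START = "# spawn:core:start"
--
-- CORE_IGNORE_BLOCK_END = "# spawn:core:end"
--
-- EXT_IGNORE_BLOCK_START = "# spawn:ext:start"
--
-- EXT_IGNORE_BLOCK_END = "# spawn:ext:end"
--
-- def _normalize_ignore_inner_lines(inner: list[str]) -> list[str]: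
--     out: list[str] = []
--     seen: set[str] = set()
--     for ln in inner:
--         st = ln.strip()
--         if not st or st.startswith("#"):
--             continue
--         if st not in seen:
--             seen.add(st)
--             out.append(st)
--     return out
--
-- def _block_kind(line_stripped: str) -> str | None:
--     if line_stripped == IGNORE_BLOCK_START:
--         return "legacy"
--     if line_stripped == CORE_IGNORE_BLOCK_START:
--         return "core"
--     if line_stripped == EXT_IGNORE_BLOCK_START:
--         return "ext"
--     return None
--
-- def _end_marker_for(kind: str) -> str:
--     if kind == "legacy":
--         return IGNORE_BLOCK_END
--     if kind == "core":
--         return CORE_IGNORE_BLOCK_END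
--     if kind == "ext":
--         return EXT_IGNORE_BLOCK_END
--     raise ValueError(kind)
--
-- def _parse_split_agent_ignore_lines(
--     raw_lines: list[str],
-- ) -> tuple[list[list[str]], list[str], list[str]]:
--     """Split file into user chunks (between blocks), core globs, ext globs.
--
--     Legacy ``# spawn:start`` … ``# spawn:end`` inner lines are discarded (migration).
--     Unclosed blocks: inner runs to EOF.
--     """
--     chunks: list[list[str]] = []
--     core: list[str] = []
--     ext: list[str] = []
--     cur: list[str] = []
--     i = 0
--     n = len(raw_lines)
--     while i < n:
--         kind = _block_kind(raw_lines[i].strip())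
--         if kind is None:
--             cur.append(raw_lines[i])
--             i += 1
--             continue
--         if cur:
--             chunks.append(cur)
--             cur = []
--         end_marker = _end_marker_for(kind)
--         j = i + 1
--         inner: list[str] = []
--         while j < n and raw_lines[j].strip() != end_marker:
--             inner.append(raw_lines[j])
--             j += 1
--         if kind == "core":
--             core = _normalize_ignore_inner_lines(inner)
--         elif kind == "ext":
--             ext = _normalize_ignore_inner_lines(inner)
--         # legacy: discard inner
--         i = j + 1 if j < n and raw_lines[j].strip() == end_marker else j
--     if cur:
--         chunks.append(cur)
--     return chunks, core, ext
-- ===== SOURCE B (Python) =====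
-- IGNORE_BLOCK_START = "# spawn:start"
-- IGNORE_BLOCK_END = "# spawn:end"
-- CORE_IGNORE_BLOCK_START = "# spawn:core:start"
-- CORE_IGNORE_BLOCK_END = "# spawn:core:end"
-- EXT_IGNORE_BLOCK_START = "# spawn:ext:start"
-- EXT_IGNORE_BLOCK_END = "# spawn:ext:end"
--
--
-- def _normalize_ignore_inner_lines(inner: list[str]) -> list[str]:
--     out: list[str] = []
--     seen: set[str] = set()
--     for ln in inner:
--         st = ln.strip()
--         if not st or st.startswith("#"):
--             continue
--         if st not in seen:
--             seen.add(st)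
--             out.append(st)
--     return out
--
--
-- def _block_kind(line_stripped: str) -> str | None:
--     if line_stripped == IGNORE_BLOCK_START:
--         return "legacy"
--     if line_stripped == CORE_IGNORE_BLOCK_START:
--         return "core"
--     if line_stripped == EXT_IGNORE_BLOCK_START:
--         return "ext"
--     return None
--
--
-- def _end_marker_for(kind: str) -> str:
--     if kind == "legacy":
--         return IGNORE_BLOCK_END
--     if kind == "core":
--         return CORE_IGNORE_BLOCK_END
--     return EXT_IGNORE_BLOCK_END
--
--
-- def _parse_split_agent_ignore_lines(
--     raw_lines: list[str],
-- ) -> tuple[list[list[str]], list[str], list[str]]: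
--     """Single flat for-loop state machine: mode is None outside blocks, else the block kind."""
--     chunks: list[list[str]] = []
--     core: list[str] = []
--     ext: list[str] = []
--     cur: list[str] = []
--     mode: str | None = None
--     inner: list[str] = []
--     for line in raw_lines:
--         st = line.strip()
--         if mode is None:
--             kind = _block_kind(st)
--             if kind is None:
--                 cur.append(line)
--             else:
--                 if cur:
--                     chunks.append(cur)
--                     cur = []
--                 mode = kind
--                 inner = []
--         elif st == _end_marker_for(mode):
--             if mode == "core":
--                 core = _normalize_ignore_inner_lines(inner)
--             elif mode == "ext":
--                 ext = _normalize_ignore_inner_lines(inner)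
--             mode = None
--             inner = []
--         else:
--             inner.append(line)
--     if mode == "core":
--         core = _normalize_ignore_inner_lines(inner)
--     elif mode == "ext":
--         ext = _normalize_ignore_inner_lines(inner)
--     if cur:
--         chunks.append(cur)
--     return chunks, core, ext
-- ===== Notes on version B (the rewrite author's own statement) =====
-- stated objective: idiomatic
-- what changed: Replaced A's index-based outer while with a nested inner index scan for each block by a single flat for-loop state machine over the lines with a mode variable and an inner accumulator.
import Mathlib
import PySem

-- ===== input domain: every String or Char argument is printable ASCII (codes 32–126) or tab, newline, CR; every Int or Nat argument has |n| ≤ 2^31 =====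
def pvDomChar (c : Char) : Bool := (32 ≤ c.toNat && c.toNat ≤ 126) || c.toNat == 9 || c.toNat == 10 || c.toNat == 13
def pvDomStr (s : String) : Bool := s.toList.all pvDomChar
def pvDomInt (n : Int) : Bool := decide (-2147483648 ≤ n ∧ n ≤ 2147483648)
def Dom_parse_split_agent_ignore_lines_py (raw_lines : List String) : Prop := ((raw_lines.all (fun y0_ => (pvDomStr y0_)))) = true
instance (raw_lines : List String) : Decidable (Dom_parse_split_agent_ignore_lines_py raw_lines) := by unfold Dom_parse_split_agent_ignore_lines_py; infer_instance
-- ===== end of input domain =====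

-- B replaces A's nested index-based scans by one flat for-loop state machine (objective: idiomatic).

-- shared helpers (same-module helpers the two Pythons share verbatim)
def pvBlockKind (s : String) : Option String :=
  if s = "# spawn:start" then some "legacy"
  else if s = "# spawn:core:start" then some "core"
  else if s = "# spawn:ext:start" then some "ext"
  else none

def pvEndMarker (k : String) : String :=
  if k = "legacy" then "# spawn:end"
  else if k = "core" then "# spawn:core:end"
  else "# spawn:ext:end"

-- _normalize_ignore_inner_lines: out/seen accumulators, seen is a Python set
def pvNormGo : List String → List String → PySem.Set String → List String
  | [], out, _ => out
  | ln :: rest, out, seen =>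
    let st := PySem.Str.strip ln
    if st = "" || PySem.Str.startswith st "#" then pvNormGo rest out seen
    else if PySem.Set.contains seen st then pvNormGo rest out seen
    else pvNormGo rest (out ++ [st]) (PySem.Set.add seen st)

def pvNorm (inner : List String) : List String := pvNormGo inner [] PySem.Set.empty

-- ===== PORT A =====
-- A's inner while loop (j scan for the end marker) over the suffix after the start line:
-- returns the inner lines and `some rest` of the list after the end marker (none = ran to EOF).
def pvSplitInner (k : String) : List String → List String × Option (List String)
  | [] => ([], none)
  | l :: rest =>
    if PySem.Str.strip l = pvEndMarker k then ([], some rest)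
    else
      let p := pvSplitInner k rest
      (l :: p.1, p.2)

theorem pvSplitInner_len (k : String) : ∀ (ls rem : List String),
    (pvSplitInner k ls).2 = some rem → rem.length < ls.length := by
  intro ls
  induction ls with
  | nil => intro rem h; simp [pvSplitInner] at h
  | cons l rest ih =>
    intro rem h
    simp only [pvSplitInner] at h
    split at h
    · simp at h; subst h; simp
    · have := ih rem h
      simp; omega

-- A's outer while loop, index i replaced by the structurally-equal suffix.
def pvALoop : List String → List (List String) → List String → List String → List String →
    List (List String) × List String × List String
  | [], chunks, cur, core, ext => ((if cur = [] then chunks else chunks ++ [cur]), core, ext)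
  | l :: rest, chunks, cur, core, ext =>
    match pvBlockKind (PySem.Str.strip l) with
    | none => pvALoop rest chunks (cur ++ [l]) core ext
    | some k =>
      let chunks' := if cur = [] then chunks else chunks ++ [cur]
      let p := pvSplitInner k rest
      let core' := if k = "core" then pvNorm p.1 else core
      let ext' := if k = "ext" then pvNorm p.1 else ext
      match h : p.2 with
      | some rem => pvALoop rem chunks' [] core' ext'
      | none => (chunks', core', ext')
  termination_by ls => ls.length
  decreasing_by
    · simp
    · have := pvSplitInner_len k rest rem h
      simp; omega

def parse_split_agent_ignore_lines_py (raw_lines : List String) :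
    List (List String) × List String × List String :=
  pvALoop raw_lines [] [] [] []

-- ===== PORT B =====
-- B's single flat for-loop: mode = none outside blocks, some kind inside; inner accumulates block lines.
def pvBLoop : List String → List (List String) → List String → List String → List String →
    Option String → List String → List (List String) × List String × List String
  | [], chunks, cur, core, ext, mode, inner =>
    let core' := if mode = some "core" then pvNorm inner else core
    let ext' := if mode = some "ext" then pvNorm inner else ext
    ((if cur = [] then chunks else chunks ++ [cur]), core', ext')
  | l :: rest, chunks, cur, core, ext, mode, inner =>
    let st := PySem.Str.strip l
    match mode with
    | none =>
      match pvBlockKind st with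
      | none => pvBLoop rest chunks (cur ++ [l]) core ext none inner
      | some k => pvBLoop rest (if cur = [] then chunks else chunks ++ [cur]) [] core ext (some k) []
    | some k =>
      if st = pvEndMarker k then
        pvBLoop rest chunks cur (if k = "core" then pvNorm inner else core)
          (if k = "ext" then pvNorm inner else ext) none []
      else pvBLoop rest chunks cur core ext (some k) (inner ++ [l])

def parse_split_agent_ignore_lines_py_alt (raw_lines : List String) :
    List (List String) × List String × List String :=
  pvBLoop raw_lines [] [] [] [] none []

-- ===== PRECONDITION & SPEC =====
def Spec_parse_split_agent_ignore_lines_py (raw_lines : List String) (out : List (List String) × List String × List String) : Prop := out = parse_split_agent_ignore_lines_py_alt raw_lines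
instance (raw_lines : List String) (out : List (List String) × List String × List String) : Decidable (Spec_parse_split_agent_ignore_lines_py raw_lines out) := by unfold Spec_parse_split_agent_ignore_lines_py; infer_instance

-- ===== CLAIM (what is proved, stated in full; the proofs are below) =====
def Claim_equal_parse_split_agent_ignore_lines_py : Prop := ∀ (raw_lines : List String), Dom_parse_split_agent_ignore_lines_py raw_lines → Spec_parse_split_agent_ignore_lines_py raw_lines (parse_split_agent_ignore_lines_py raw_lines)

-- ===== LEMMAS AND PROOFS =====

-- In block mode, B's loop consumes lines exactly up to A's end-marker split point.
theorem pvBLoop_some (k : String) : ∀ (ls inner : List String)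
    (chunks : List (List String)) (cur core ext : List String),
    pvBLoop ls chunks cur core ext (some k) inner =
      (let p := pvSplitInner k ls
       let core' := if k = "core" then pvNorm (inner ++ p.1) else core
       let ext' := if k = "ext" then pvNorm (inner ++ p.1) else ext
       match p.2 with
       | some rem => pvBLoop rem chunks cur core' ext' none []
       | none => ((if cur = [] then chunks else chunks ++ [cur]), core', ext')) := by
  intro ls
  induction ls with
  | nil =>
    intro inner chunks cur core ext
    simp [pvBLoop, pvSplitInner]
  | cons l rest ih =>
    intro inner chunks cur core ext
    simp only [pvBLoop, pvSplitInner]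
    by_cases h : PySem.Str.strip l = pvEndMarker k
    · simp [h]
    · simp only [h, ite_false]
      rw [ih]
      simp [List.append_assoc]

theorem pvALoop_eq_pvBLoop : ∀ (n : Nat) (ls : List String), ls.length ≤ n →
    ∀ (chunks : List (List String)) (cur core ext : List String),
    pvALoop ls chunks cur core ext = pvBLoop ls chunks cur core ext none [] := by
  intro n
  induction n with
  | zero =>
    intro ls hl chunks cur core ext
    have : ls = [] := List.length_eq_zero_iff.mp (Nat.le_zero.mp hl)
    subst this
    simp [pvALoop, pvBLoop]
  | succ m ih =>
    intro ls hl chunks cur core ext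
    match ls with
    | [] => simp [pvALoop, pvBLoop]
    | l :: rest =>
      simp only [pvALoop, pvBLoop]
      match hk : pvBlockKind (PySem.Str.strip l) with
      | none =>
        simp only [List.length_cons] at hl
        exact ih rest (by omega) chunks (cur ++ [l]) core ext
      | some k =>
        simp only []
        rw [pvBLoop_some]
        simp only []
        match hp : (pvSplitInner k rest).2 with
        | some rem =>
          have hlen := pvSplitInner_len k rest rem hp
          simp only [List.length_cons] at hl
          simp only [List.nil_append]
          exact ih rem (by omega) _ [] _ _
        | none => simp

-- ===== VERDICT (by name: the statement is the Claim_ definition above) =====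
theorem parse_split_agent_ignore_lines_py_spec : Claim_equal_parse_split_agent_ignore_lines_py := by
  intro raw_lines _
  unfold Spec_parse_split_agent_ignore_lines_py parse_split_agent_ignore_lines_py
    parse_split_agent_ignore_lines_py_alt
  exact pvALoop_eq_pvBLoop raw_lines.length raw_lines le_rfl [] [] [] []
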